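-- pv_equiv track=rewrite | github.com/K-ple/Algorithms_Judge | 프로그래머스/0/181872. 특정 문자열로 끝나는 가장 긴 부분 문자열 찾기/특정 문자열로 끝나는 가장 긴 부분 문자열 찾기.py | solution
-- ===== SOURCE A (Python) =====
-- def solution(myString, pat):
--     answer = ''
--     reverse_string = myString[::-1]
--     reverse_pat = pat[::-1]
--     for i in range(len(reverse_string)):
--         if reverse_string[i:i+len(pat)] == reverse_pat:
--             answer += reverse_string[i:]
--             break
--     return answer[::-1]
-- ===== SOURCE B (Python) =====
-- def solution(myString, pat):
--     idx = myString.rfind(pat)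
--     return '' if idx == -1 else myString[:idx + len(pat)]
-- ===== Notes on version B (the rewrite author's own statement) =====
-- stated objective: faster
-- what changed: A reverses both strings and scans forward for the first match of the reversed pattern; B scans backward once for the last occurrence of pat (str.rfind) and returns a single prefix slice, avoiding the two full reversals, the O(n)-sized suffix copy and the final reversal.
import Mathlib
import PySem

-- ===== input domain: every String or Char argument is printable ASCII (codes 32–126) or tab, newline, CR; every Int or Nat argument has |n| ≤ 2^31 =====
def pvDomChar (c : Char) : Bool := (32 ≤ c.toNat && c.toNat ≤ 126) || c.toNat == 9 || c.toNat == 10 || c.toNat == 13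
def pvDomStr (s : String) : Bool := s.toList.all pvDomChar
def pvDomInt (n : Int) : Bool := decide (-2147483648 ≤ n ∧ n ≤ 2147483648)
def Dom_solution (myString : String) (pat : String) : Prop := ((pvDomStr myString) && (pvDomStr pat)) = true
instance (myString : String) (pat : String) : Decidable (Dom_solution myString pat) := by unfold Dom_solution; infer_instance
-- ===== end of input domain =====

-- B replaces A's reverse-both-strings-and-scan-forward search by a single backward
-- scan for the last occurrence of pat (Python str.rfind) followed by one slice.

-- slice comparison s[j:j+len(p)] == p (indices here are nonneg Nats, so drop/take is exact)
def matchAt (s p : List Char) (j : Nat) : Bool := (s.drop j).take p.length == p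

-- ===== PORT A =====
-- the 'for i in range(...)' loop: on a match, answer += reverse_string[i:] and break
def solLoopA (r q : List Char) : List Nat → List Char
  | [] => []
  | i :: is => if matchAt r q i then r.drop i else solLoopA r q is

def solution (myString : String) (pat : String) : String :=
  -- myString[::-1] / pat[::-1] are exact full reversals of the char list
  let r := myString.toList.reverse
  let q := pat.toList.reverse
  String.ofList (solLoopA r q (List.range r.length)).reverse

-- ===== PORT B =====
-- hand port of str.rfind: scan j = len(s)-len(p) down to 0, first j with s[j:j+len(p)] == p
def rfindLoop (s p : List Char) : Nat → Option Nat
  | 0 => if matchAt s p 0 then some 0 else none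
  | j+1 => if matchAt s p (j+1) then some (j+1) else rfindLoop s p j

def solution_alt (myString : String) (pat : String) : String :=
  let sl := myString.toList
  let pl := pat.toList
  match rfindLoop sl pl (sl.length - pl.length) with
  | some j => String.ofList (sl.take (j + pl.length))
  | none => ""

-- ===== PRECONDITION & SPEC =====
def Spec_solution (myString : String) (pat : String) (out : String) : Prop := out = solution_alt myString pat
instance (myString : String) (pat : String) (out : String) : Decidable (Spec_solution myString pat out) := by unfold Spec_solution; infer_instance

-- ===== CLAIM (what is proved, stated in full; the proofs are below) =====
def Claim_equal_solution : Prop := ∀ (myString : String) (pat : String), Dom_solution myString pat → Spec_solution myString pat (solution myString pat)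

-- ===== LEMMAS AND PROOFS =====

-- A's loop is "first index in the list that matches, take the suffix there"
theorem solLoopA_eq_find? (r q : List Char) (is : List Nat) :
    solLoopA r q is = match is.find? (fun i => matchAt r q i) with
      | some i => r.drop i
      | none => [] := by
  induction is with
  | nil => rfl
  | cons i is ih =>
    by_cases h : matchAt r q i = true
    · simp [solLoopA, List.find?, h]
    · simp only [Bool.not_eq_true] at h
      simp [solLoopA, List.find?, h, ih]

-- B's loop is "last index ≤ j that matches" = find? on the reversed range
theorem rfindLoop_eq_find? (s p : List Char) (j : Nat) :
    rfindLoop s p j = (List.range (j+1)).reverse.find? (fun j' => matchAt s p j') := by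
  induction j with
  | zero => simp [rfindLoop, List.range_succ]
  | succ j ih =>
    have hr : (List.range (j+2)).reverse = (j+1) :: (List.range (j+1)).reverse := by
      rw [List.range_succ, List.reverse_append]; rfl
    rw [hr]
    by_cases h : matchAt s p (j+1) = true
    · simp [rfindLoop, h, List.find?]
    · simp only [Bool.not_eq_true] at h
      simp [rfindLoop, h, List.find?, ih]

-- a slice shorter than the pattern never matches
theorem matchAt_len_lt (s p : List Char) (j : Nat) (h : s.length - j < p.length) :
    matchAt s p j = false := by
  have hl : ((s.drop j).take p.length).length = s.length - j := by
    simp [List.length_take, List.length_drop]; omega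
  unfold matchAt
  rw [beq_eq_false_iff_ne]
  intro he
  rw [he] at hl
  omega

-- list equality test commutes with reversal
theorem beq_reverse (a b : List Char) : (a.reverse == b.reverse) = (a == b) := by
  rcases h : a == b with _ | _
  · rw [beq_eq_false_iff_ne] at h ⊢
    intro he
    exact h (by simpa using congrArg List.reverse he)
  · rw [beq_iff_eq] at h
    rw [h, beq_self_eq_true]

-- reflection: matching p.reverse at i in s.reverse = matching p at n-m-i in s, when i+m ≤ n
theorem matchAt_reverse (s p : List Char) (i : Nat)
    (h : i + p.length ≤ s.length) :
    matchAt s.reverse p.reverse i = matchAt s p (s.length - p.length - i) := by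
  unfold matchAt
  have h1 : (s.reverse.drop i) = (s.take (s.length - i)).reverse := List.drop_reverse
  rw [List.length_reverse, h1, List.take_reverse, List.length_take, List.drop_take]
  have h2 : min (s.length - i) s.length - p.length = s.length - p.length - i := by omega
  rw [h2]
  have h3 : s.length - i - (s.length - p.length - i) = p.length := by omega
  rw [h3]
  exact beq_reverse _ _

-- find? only depends on predicate values on members
theorem find?_congr_mem {α : Type} (l : List α) (f g : α → Bool)
    (h : ∀ a ∈ l, f a = g a) : l.find? f = l.find? g := by
  induction l with
  | nil => rfl
  | cons a l ih =>
    have ha := h a (List.mem_cons_self)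
    by_cases hf : f a = true
    · simp [List.find?, hf, ha ▸ hf]
    · simp only [Bool.not_eq_true] at hf
      simp [List.find?, hf, ha ▸ hf, ih (fun a h' => h a (List.mem_cons_of_mem _ h'))]

-- reversed range as a map
theorem reverse_range_map (k : Nat) :
    (List.range (k+1)).reverse = (List.range (k+1)).map (fun i => k - i) := by
  conv_lhs => rw [List.range_eq_range']
  rw [List.reverse_range', List.range_eq_range']
  congr 1
  funext x
  omega

-- rfindLoop on the empty pattern always succeeds at its start index
theorem rfindLoop_nil (s : List Char) (j : Nat) : rfindLoop s [] j = some j := by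
  cases j <;> simp [rfindLoop, matchAt]

theorem main_lists (s p : List Char) :
    (solLoopA s.reverse p.reverse (List.range s.length)).reverse =
      (match rfindLoop s p (s.length - p.length) with
        | some j => s.take (j + p.length)
        | none => ([] : List Char)) := by
  rcases s with _ | ⟨c, s'⟩
  · -- empty string: both sides are []
    rcases p with _ | ⟨d, p'⟩ <;> simp [solLoopA, rfindLoop, matchAt]
  rcases p with _ | ⟨d, p'⟩
  · -- empty pattern: A matches at i = 0, B at j = len(s)
    rw [show (c::s').length = s'.length + 1 from rfl, List.range_succ_eq_map, rfindLoop_nil]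
    simp [solLoopA, matchAt]
  set s := c :: s' with hs
  set p := d :: p' with hp
  set n := s.length with hn
  set m := p.length with hm
  have hn0 : 0 < n := by rw [hn, hs]; simp
  have hm0 : 0 < m := by rw [hm, hp]; simp
  rw [solLoopA_eq_find? s.reverse p.reverse (List.range n)]
  by_cases hmn : m ≤ n
  case neg =>
    -- pattern longer than string: no match on either side
    have hA : (List.range n).find? (fun i => matchAt s.reverse p.reverse i) = none := by
      apply List.find?_eq_none.mpr
      intro i hi
      rw [List.mem_range] at hi
      simp only [Bool.not_eq_true]
      apply matchAt_len_lt
      simp only [List.length_reverse]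
      omega
    have hB : rfindLoop s p (n - m) = none := by
      have h0 : n - m = 0 := by omega
      rw [h0]
      unfold rfindLoop
      rw [matchAt_len_lt s p 0 (by omega)]
      rfl
    rw [hA, hB]
    rfl
  case pos =>
    set k := n - m with hk
    -- A's find? over range n = find? over range (k+1): indices > k never match
    have hsplit : (List.range n).find? (fun i => matchAt s.reverse p.reverse i)
        = (List.range (k+1)).find? (fun i => matchAt s.reverse p.reverse i) := by
      have hdec : List.range' 0 (k+1) ++ List.range' (k+1) (n-(k+1)) = List.range' 0 n := by
        have h := @List.range'_append 0 (k+1) (n-(k+1)) 1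
        simp only [Nat.one_mul, Nat.zero_add] at h
        rw [h]
        congr 1
        omega
      rw [List.range_eq_range', ← hdec, List.find?_append, ← List.range_eq_range']
      have htail : (List.range' (k+1) (n-(k+1))).find?
          (fun i => matchAt s.reverse p.reverse i) = none := by
        apply List.find?_eq_none.mpr
        intro i hi
        rw [List.mem_range'] at hi
        obtain ⟨t, _, hit⟩ := hi
        simp only [Bool.not_eq_true]
        apply matchAt_len_lt
        simp only [List.length_reverse]
        omega
      rw [htail, Option.or_none]
    -- transfer the predicate through the reflection i ↦ k - i
    have hcongr : (List.range (k+1)).find? (fun i => matchAt s.reverse p.reverse i)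
        = (List.range (k+1)).find? (fun i => matchAt s p (k - i)) := by
      apply find?_congr_mem
      intro i hi
      rw [List.mem_range] at hi
      rw [matchAt_reverse s p i (by omega)]
    -- B's loop as the mapped find?
    have hB : rfindLoop s p k
        = ((List.range (k+1)).find? (fun i => matchAt s p (k - i))).map (fun i => k - i) := by
      rw [rfindLoop_eq_find?, reverse_range_map, List.find?_map]
      rfl
    rw [hsplit, hcongr, hB]
    rcases hfind : (List.range (k+1)).find? (fun i => matchAt s p (k - i)) with _ | i
    · rfl
    · -- a match at i ≤ k: both sides are the prefix of length n - i
      have hik : i < k + 1 := by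
        have hmem := List.mem_of_find?_eq_some hfind
        rwa [List.mem_range] at hmem
      simp only [Option.map_some]
      rw [List.drop_reverse, List.reverse_reverse]
      congr 1
      omega

-- ===== VERDICT (by name: the statement is the Claim_ definition above) =====
theorem solution_spec : Claim_equal_solution := by
  intro myString pat _
  unfold Spec_solution solution solution_alt
  simp only [List.length_reverse]
  rw [main_lists]
  rcases h : rfindLoop myString.toList pat.toList (myString.toList.length - pat.toList.length)
    with _ | j <;> rfl
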